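-- pv_equiv track=rewrite | github.com/stonewell/learn-curve | test/test_cross.py | hl_cross_n_days
-- ===== SOURCE A (Python) =====
-- def hl_cross_n_days(v1, v2, n):
--     for i in range(n - 1):
--         v = (
--             True
--             and all([v1[x] <= v1[i] for x in range(i + 1, n)])
--             and all([v1[x] <= v2[x] for x in range(i, n)])
--         )
--
--         if v:
--             return True
--
--     return False
-- ===== SOURCE B (Python) =====
-- def hl_cross_n_days(v1, v2, n):
--     # Single backward pass: maintain the suffix max of v1 and whether
--     # v1[x] <= v2[x] holds on the whole suffix; O(n) instead of O(n^2).
--     if n < 2: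
--         return False
--     smax = v1[n - 1]
--     ok = v1[n - 1] <= v2[n - 1]
--     for i in range(n - 2, -1, -1):
--         if ok and smax <= v1[i] and v1[i] <= v2[i]:
--             return True
--         ok = ok and v1[i] <= v2[i]
--         smax = max(smax, v1[i])
--     return False
-- ===== Notes on version B (the rewrite author's own statement) =====
-- stated objective: faster
-- what changed: Replaced the per-index rescans of both suffixes by one backward pass that maintains the running suffix max of v1 and a running flag 'v1<=v2 holds on the suffix', checking each i in O(1).
-- outside the precondition, e.g. on hl_cross_n_days([0, 94, 1, 6, 2, 8], [], 2): A returns False, B raises IndexError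
import Mathlib
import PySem

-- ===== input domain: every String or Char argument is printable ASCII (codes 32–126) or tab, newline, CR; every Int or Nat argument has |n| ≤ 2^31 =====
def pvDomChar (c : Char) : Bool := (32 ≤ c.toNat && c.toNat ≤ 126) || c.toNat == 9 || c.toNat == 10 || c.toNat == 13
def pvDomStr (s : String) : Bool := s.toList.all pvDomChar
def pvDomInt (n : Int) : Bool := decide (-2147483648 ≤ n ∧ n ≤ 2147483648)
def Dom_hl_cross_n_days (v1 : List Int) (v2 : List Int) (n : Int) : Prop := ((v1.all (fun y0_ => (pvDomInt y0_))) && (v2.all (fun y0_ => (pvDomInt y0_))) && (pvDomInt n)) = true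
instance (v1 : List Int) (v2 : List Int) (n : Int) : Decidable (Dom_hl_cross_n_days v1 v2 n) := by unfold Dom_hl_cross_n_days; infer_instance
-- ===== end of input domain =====

-- B replaces A's per-index rescans of both suffixes by one backward pass keeping the
-- suffix max of v1 and a suffix-wide 'v1<=v2' flag (measured asymptotically faster).


-- ===== PORT A =====
-- literal port of A: for each i in range(n-1), build the two comprehension lists and
-- test all(...) on each; return True on the first hit (any), else False.
-- xs[x] is ported as pyGetD (in range on every input admitted by Pre_).
def hl_cross_n_days (v1 : List Int) (v2 : List Int) (n : Int) : Bool :=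
  (PySem.List.pyRange 0 (n - 1) 1).any (fun i =>
    true
    && ((PySem.List.pyRange (i + 1) n 1).map
          (fun x => decide (PySem.List.pyGetD v1 x 0 ≤ PySem.List.pyGetD v1 i 0))).all id
    && ((PySem.List.pyRange i n 1).map
          (fun x => decide (PySem.List.pyGetD v1 x 0 ≤ PySem.List.pyGetD v2 x 0))).all id)

-- ===== PORT B =====
-- backward loop of Source B: i counts down from n-2 to 0; smax is the suffix max of v1,
-- ok the suffix-wide 'v1[x] <= v2[x]' flag.
def hlAltLoop (v1 : List Int) (v2 : List Int) : Nat → Int → Bool → Bool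
  | 0, smax, ok =>
      ok && decide (smax ≤ PySem.List.pyGetD v1 0 0)
         && decide (PySem.List.pyGetD v1 0 0 ≤ PySem.List.pyGetD v2 0 0)
  | j + 1, smax, ok =>
      (ok && decide (smax ≤ PySem.List.pyGetD v1 ((j : Int) + 1) 0)
          && decide (PySem.List.pyGetD v1 ((j : Int) + 1) 0 ≤ PySem.List.pyGetD v2 ((j : Int) + 1) 0))
      || hlAltLoop v1 v2 j (max smax (PySem.List.pyGetD v1 ((j : Int) + 1) 0))
           (ok && decide (PySem.List.pyGetD v1 ((j : Int) + 1) 0 ≤ PySem.List.pyGetD v2 ((j : Int) + 1) 0))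

def hl_cross_n_days_alt (v1 : List Int) (v2 : List Int) (n : Int) : Bool :=
  if n < 2 then false
  else
    hlAltLoop v1 v2 (n - 2).toNat (PySem.List.pyGetD v1 (n - 1) 0)
      (decide (PySem.List.pyGetD v1 (n - 1) 0 ≤ PySem.List.pyGetD v2 (n - 1) 0))

-- ===== PRECONDITION & SPEC =====
-- Pre_ excludes the inputs where indexing up to n-1 is out of range: when n ≥ 2 A reads
-- v1[0..n-1] on its first iteration (IndexError if v1 is shorter), and it reads v2[0..n-1]
-- too unless its short-circuited 'and' returns False first — on a too-short v2 A may thus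
-- still return False, a value B (which reads v2[n-1] up front) cannot reproduce; excluded.
def Pre_hl_cross_n_days (v1 : List Int) (v2 : List Int) (n : Int) : Prop :=
  n < 2 ∨ (n ≤ (v1.length : Int) ∧ n ≤ (v2.length : Int))
instance (v1 : List Int) (v2 : List Int) (n : Int) : Decidable (Pre_hl_cross_n_days v1 v2 n) := by
  unfold Pre_hl_cross_n_days; infer_instance

def pvWitness_hl_cross_n_days : List Int × List Int × Int := ([1, 3, 2], [2, 3, 2], 3)

def Spec_hl_cross_n_days (v1 : List Int) (v2 : List Int) (n : Int) (out : Bool) : Prop := out = hl_cross_n_days_alt v1 v2 n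
instance (v1 : List Int) (v2 : List Int) (n : Int) (out : Bool) : Decidable (Spec_hl_cross_n_days v1 v2 n out) := by unfold Spec_hl_cross_n_days; infer_instance

-- ===== CLAIM (what is proved, stated in full; the proofs are below) =====
def Claim_equal_hl_cross_n_days : Prop := ∀ (v1 : List Int) (v2 : List Int) (n : Int), Dom_hl_cross_n_days v1 v2 n → Pre_hl_cross_n_days v1 v2 n → Spec_hl_cross_n_days v1 v2 n (hl_cross_n_days v1 v2 n)

-- ===== LEMMAS AND PROOFS =====

-- the condition A tests at index i, as a proposition
def hlCond (v1 : List Int) (v2 : List Int) (n : Int) (i : Int) : Prop :=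
  (∀ x : Int, i < x → x < n → PySem.List.pyGetD v1 x 0 ≤ PySem.List.pyGetD v1 i 0) ∧
  (∀ x : Int, i ≤ x → x < n → PySem.List.pyGetD v1 x 0 ≤ PySem.List.pyGetD v2 x 0)

lemma hlA_iff (v1 v2 : List Int) (n : Int) :
    hl_cross_n_days v1 v2 n = true ↔ ∃ i : Int, 0 ≤ i ∧ i < n - 1 ∧ hlCond v1 v2 n i := by
  unfold hl_cross_n_days hlCond
  simp [List.any_eq_true, List.all_eq_true, PySem.List.mem_pyRange_one]
  constructor
  · rintro ⟨i, ⟨h0, h1⟩, ha, hb⟩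
    exact ⟨i, h0, h1, fun x hx hx' => ha x (by omega) hx', fun x hx hx' => hb x hx hx'⟩
  · rintro ⟨i, h0, h1, ha, hb⟩
    exact ⟨i, ⟨h0, h1⟩, fun x hx hx' => ha x (by omega) hx', fun x hx hx' => hb x hx hx'⟩

lemma hlAltLoop_iff (v1 v2 : List Int) (n : Int) :
    ∀ (j : Nat) (smax : Int) (ok : Bool),
      (j : Int) + 1 < n →
      (ok = true ↔ ∀ x : Int, (j : Int) < x → x < n → PySem.List.pyGetD v1 x 0 ≤ PySem.List.pyGetD v2 x 0) →
      (∀ t : Int, smax ≤ t ↔ ∀ x : Int, (j : Int) < x → x < n → PySem.List.pyGetD v1 x 0 ≤ t) →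
      (hlAltLoop v1 v2 j smax ok = true ↔ ∃ i : Nat, i ≤ j ∧ hlCond v1 v2 n (i : Int)) := by
  intro j
  induction j with
  | zero =>
    intro smax ok hn hok hmax
    simp only [hlAltLoop, Bool.and_eq_true, decide_eq_true_eq, Nat.cast_zero] at *
    constructor
    · rintro ⟨⟨h1, h2⟩, h3⟩
      refine ⟨0, le_refl _, fun x hx hx' => (hmax _).1 h2 x (by omega) hx', fun x hx hx' => ?_⟩
      rcases eq_or_lt_of_le hx with h | h
      · simpa [← h] using h3
      · exact hok.1 h1 x (by omega) hx'
    · rintro ⟨i, hi, ha, hb⟩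
      interval_cases i
      simp only [Nat.cast_zero] at ha hb
      exact ⟨⟨hok.2 (fun x hx hx' => hb x (by omega) hx'),
              (hmax _).2 (fun x hx hx' => ha x (by omega) hx')⟩,
             hb 0 (le_refl _) (by omega)⟩
  | succ j ih =>
    intro smax ok hn hok hmax
    have hc : ((j + 1 : Nat) : Int) = (j : Int) + 1 := by push_cast; ring
    rw [hc] at hok hmax hn
    have hn' : (j : Int) + 1 < n := by omega
    -- characterisation of the updated flag
    have hok' : (ok && decide (PySem.List.pyGetD v1 ((j : Int) + 1) 0 ≤ PySem.List.pyGetD v2 ((j : Int) + 1) 0)) = true ↔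
        ∀ x : Int, (j : Int) < x → x < n → PySem.List.pyGetD v1 x 0 ≤ PySem.List.pyGetD v2 x 0 := by
      simp only [Bool.and_eq_true, decide_eq_true_eq, hok]
      constructor
      · rintro ⟨h1, h2⟩ x hx hx'
        rcases eq_or_lt_of_le (by omega : (j : Int) + 1 ≤ x) with h | h
        · simpa [← h] using h2
        · exact h1 x h hx'
      · intro h
        exact ⟨fun x hx hx' => h x (by omega) hx', h _ (by omega) hn'⟩
    -- characterisation of the updated suffix max
    have hmax' : ∀ t : Int, max smax (PySem.List.pyGetD v1 ((j : Int) + 1) 0) ≤ t ↔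
        ∀ x : Int, (j : Int) < x → x < n → PySem.List.pyGetD v1 x 0 ≤ t := by
      intro t
      rw [max_le_iff, hmax t]
      constructor
      · rintro ⟨h1, h2⟩ x hx hx'
        rcases eq_or_lt_of_le (by omega : (j : Int) + 1 ≤ x) with h | h
        · simpa [← h] using h2
        · exact h1 x h hx'
      · intro h
        exact ⟨fun x hx hx' => h x (by omega) hx', h _ (by omega) hn'⟩
    -- the check at index j+1 is exactly hlCond (j+1)
    have hcheck : ((ok && decide (smax ≤ PySem.List.pyGetD v1 ((j : Int) + 1) 0))
          && decide (PySem.List.pyGetD v1 ((j : Int) + 1) 0 ≤ PySem.List.pyGetD v2 ((j : Int) + 1) 0)) = true ↔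
        hlCond v1 v2 n ((j : Int) + 1) := by
      unfold hlCond
      simp only [Bool.and_eq_true, decide_eq_true_eq, hok, hmax]
      constructor
      · rintro ⟨⟨h1, h2⟩, h3⟩
        refine ⟨fun x hx hx' => h2 x hx hx', fun x hx hx' => ?_⟩
        rcases eq_or_lt_of_le hx with h | h
        · simpa [← h] using h3
        · exact h1 x h hx'
      · rintro ⟨ha, hb⟩
        exact ⟨⟨fun x hx hx' => hb x (by omega) hx', ha⟩, hb _ (le_refl _) hn'⟩
    show ((ok && _) && _ || hlAltLoop v1 v2 j _ _) = true ↔ _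
    rw [Bool.or_eq_true, hcheck, ih _ _ hn' hok' hmax']
    constructor
    · rintro (h | ⟨i, hi, h⟩)
      · exact ⟨j + 1, le_refl _, by rwa [hc]⟩
      · exact ⟨i, by omega, h⟩
    · rintro ⟨i, hi, h⟩
      rcases Nat.lt_or_ge i (j + 1) with hlt | hge
      · exact Or.inr ⟨i, by omega, h⟩
      · have : i = j + 1 := by omega
        subst this
        rw [hc] at h
        exact Or.inl h

-- ===== VERDICT (by name: the statement is the Claim_ definition above) =====
theorem hl_cross_n_days_spec : Claim_equal_hl_cross_n_days := by
  intro v1 v2 n _ hpre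
  unfold Spec_hl_cross_n_days
  by_cases hlt : n < 2
  · simp [hl_cross_n_days, hl_cross_n_days_alt,
      PySem.List.pyRange_one_eq_nil (by omega : n - 1 ≤ (0 : Int)), hlt]
  · have hj : (((n - 2).toNat : Int)) = n - 2 := Int.toNat_of_nonneg (by omega)
    rw [Bool.eq_iff_iff, hlA_iff]
    unfold hl_cross_n_days_alt
    rw [if_neg (by omega)]
    rw [hlAltLoop_iff v1 v2 n (n - 2).toNat _ _ (by omega)
      (by
        simp only [hj, decide_eq_true_eq]
        constructor
        · intro h x hx hx'
          have : x = n - 1 := by omega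
          subst this; exact h
        · intro h; exact h (n - 1) (by omega) (by omega))
      (by
        intro t
        simp only [hj]
        constructor
        · intro h x hx hx'
          have : x = n - 1 := by omega
          subst this; exact h
        · intro h; exact h (n - 1) (by omega) (by omega))]
    constructor
    · rintro ⟨i, h0, h1, h⟩
      refine ⟨i.toNat, by omega, ?_⟩
      rwa [Int.toNat_of_nonneg h0]
    · rintro ⟨i, hi, h⟩
      exact ⟨(i : Int), by omega, by omega, h⟩
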